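-- pv_equiv track=rewrite | github.com/biyakim/Python | 실습/wc2.py | wc2
-- ===== SOURCE A (Python) =====
-- def wc2(chars):
--     word_count = 0
--     char_count = 0
--     whitespace_count = 0
--     word_flag = False
--
--     for char in chars:
--         if char == ' ':
--             whitespace_count = whitespace_count+1
--             word_flag = False
--             continue
--         char_count = char_count +1
--         if word_flag == False:
--             word_count = word_count+1
--             word_flag = True
--     return word_count, char_count, whitespace_count
-- ===== SOURCE B (Python) =====
-- def wc2(chars):
--     # B: three straight-line counts instead of A's one stateful flag-tracking loop.
--     whitespace_count = sum(1 for c in chars if c == ' ')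
--     char_count = len(chars) - whitespace_count
--     # a word starts at a non-space char whose predecessor (virtually ' ' at the front) is a space
--     word_count = sum(1 for prev, c in zip(' ' + chars, chars) if c != ' ' and prev == ' ')
--     return word_count, char_count, whitespace_count
-- ===== Notes on version B (the rewrite author's own statement) =====
-- stated objective: simpler
-- what changed: Replaces A's single stateful loop (word flag plus three mutable counters) with three independent straight-line counts: whitespace via a comprehension, char count as length minus whitespace, and word count as the number of word-start positions read off the string zipped with its space-prefixed shift.
import Mathlib
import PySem

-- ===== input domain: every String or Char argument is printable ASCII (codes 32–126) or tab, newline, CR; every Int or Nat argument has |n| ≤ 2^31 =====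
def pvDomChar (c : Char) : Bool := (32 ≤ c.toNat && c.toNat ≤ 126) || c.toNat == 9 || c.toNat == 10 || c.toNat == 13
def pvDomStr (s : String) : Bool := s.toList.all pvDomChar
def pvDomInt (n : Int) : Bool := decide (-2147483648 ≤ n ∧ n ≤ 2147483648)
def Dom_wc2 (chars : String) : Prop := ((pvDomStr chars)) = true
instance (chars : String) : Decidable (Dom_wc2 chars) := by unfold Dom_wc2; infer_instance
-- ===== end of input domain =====

-- B replaces A's single stateful flag-tracking loop by three independent straight-line counts (objective: simpler).
-- ===== PORT A =====
-- literal port of A: one fold over the characters carrying (word_count, char_count, whitespace_count, word_flag)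
def wc2Step (st : Int × Int × Int × Bool) (c : Char) : Int × Int × Int × Bool :=
  match st with
  | (w, cc, s, flag) =>
    if c == ' ' then (w, cc, s + 1, false)
    else if flag == false then (w + 1, cc + 1, s, true)
    else (w, cc + 1, s, flag)

def wc2 (chars : String) : Int × Int × Int :=
  match chars.toList.foldl wc2Step (0, 0, 0, false) with
  | (w, cc, s, _) => (w, cc, s)

-- ===== PORT B =====
-- port of Source B: whitespace by countP, char count by subtraction, words by counting word starts on the zipped shift
def wc2_alt (chars : String) : Int × Int × Int :=
  let cs := chars.toList
  let whitespaceCount : Int := (cs.countP (fun c => c == ' ') : Nat)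
  let charCount : Int := (cs.length : Int) - whitespaceCount
  let wordCount : Int := ((((' ' :: cs).zip cs).countP (fun p => p.2 != ' ' && p.1 == ' ')) : Nat)
  (wordCount, charCount, whitespaceCount)

-- ===== PRECONDITION & SPEC =====
def Spec_wc2 (chars : String) (out : Int × Int × Int) : Prop := out = wc2_alt chars
instance (chars : String) (out : Int × Int × Int) : Decidable (Spec_wc2 chars out) := by unfold Spec_wc2; infer_instance

-- ===== CLAIM (what is proved, stated in full; the proofs are below) =====
def Claim_equal_wc2 : Prop := ∀ (chars : String), Dom_wc2 chars → Spec_wc2 chars (wc2 chars)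

-- ===== LEMMAS AND PROOFS =====

-- the number of words A's flag loop counts, given the incoming flag state
def countWords : Bool → List Char → Nat
  | _, [] => 0
  | flag, c :: rest =>
    if c == ' ' then countWords false rest
    else (if flag then 0 else 1) + countWords true rest

-- the flag state A's loop ends in
def endFlag : Bool → List Char → Bool
  | flag, [] => flag
  | _, c :: rest => endFlag (c != ' ') rest

-- A's fold, from an arbitrary state, in closed form
lemma wc2_fold_char (cs : List Char) : ∀ (w cc s : Int) (flag : Bool),
    cs.foldl wc2Step (w, cc, s, flag)
      = (w + (countWords flag cs : Int), cc + (cs.countP (fun c => c != ' ') : Int),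
         s + (cs.countP (fun c => c == ' ') : Int), endFlag flag cs) := by
  induction cs with
  | nil => intro w cc s flag; simp [countWords, endFlag]
  | cons c rest ih =>
    intro w cc s flag
    rw [List.foldl_cons]
    by_cases hc : c = ' '
    · subst hc
      simp [wc2Step, countWords, endFlag, ih]
      omega
    · have hbne : (c != ' ') = true := by simp [hc]
      cases flag <;>
        (simp [wc2Step, countWords, endFlag, hc, hbne, ih]; omega)

-- B's zipped-shift count equals A's flag count when the flag encodes "previous char is not a space"
lemma countWords_zip (cs : List Char) : ∀ (p : Char),
    ((p :: cs).zip cs).countP (fun q => q.2 != ' ' && q.1 == ' ') = countWords (p != ' ') cs := by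
  induction cs with
  | nil => intro p; simp [countWords]
  | cons c rest ih =>
    intro p
    have hz : (p :: c :: rest).zip (c :: rest) = (p, c) :: (c :: rest).zip rest := rfl
    rw [hz, List.countP_cons]
    by_cases hc : c = ' '
    · subst hc
      simp [countWords, ih]
    · have hbne : (c != ' ') = true := by simp [hc]
      by_cases hp : p = ' '
      · simp [countWords, hc, hp, hbne, ih]
        omega
      · simp [countWords, hc, hp, hbne, ih]

-- non-space chars plus spaces make up the whole string
lemma countP_split (cs : List Char) :
    cs.countP (fun c => c != ' ') + cs.countP (fun c => c == ' ') = cs.length := by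
  have := List.length_eq_countP_add_countP (p := fun c : Char => c == ' ') (l := cs)
  have h2 : cs.countP (fun c => c != ' ') = cs.countP (fun a => decide ¬((a == ' ') = true)) := by
    refine List.countP_congr ?_
    intro a _
    cases h : a == ' ' <;> simp [bne, h]
  omega

-- ===== VERDICT (by name: the statement is the Claim_ definition above) =====
theorem wc2_spec : Claim_equal_wc2 := by
  intro chars _
  unfold Spec_wc2 wc2 wc2_alt
  rw [wc2_fold_char]
  have hz := countWords_zip chars.toList ' '
  have hb : ((' ' : Char) != ' ') = false := by decide
  rw [hb] at hz
  have hlen := countP_split chars.toList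
  simp only [String.length_toList] at hlen
  simp only [zero_add]
  refine Prod.ext ?_ (Prod.ext ?_ ?_)
  · simp [hz]
  · simp; omega
  · simp
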